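-- pv_equiv track=rewrite | github.com/bntre/BlueBall | game.py | split_text_to_cells
-- ===== SOURCE A (Python) =====
-- def split_text_to_cells(text, cell_width = 4):
--     "multiline text -> [[cell]]"
--     arr = []
--     text = text.replace('\r\n', '\n')
--     for line in text.strip('\n').split('\n'):
--         a = []
--         while line:
--             cell = line[:cell_width]
--             line = line[cell_width:]
--             a.append(cell.strip())
--         arr.append(a)
--     return arr
-- ===== SOURCE B (Python) =====
-- def split_text_to_cells(text, cell_width=4):
--     "multiline text -> [[cell]]"
--     arr = []
--     for line in text.replace('\r\n', '\n').strip('\n').split('\n'):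
--         cells = []
--         buf = ''
--         for ch in line:
--             buf += ch
--             if len(buf) == cell_width:
--                 cells.append(buf.strip())
--                 buf = ''
--         if buf:
--             cells.append(buf.strip())
--         arr.append(cells)
--     return arr
-- ===== Notes on version B (the rewrite author's own statement) =====
-- stated objective: alternative
-- what changed: The inner while loop that repeatedly re-slices the line (copying the remainder each iteration) is replaced by a single left-to-right pass over the line's characters with a chunk buffer flushed every cell_width characters.
-- outside the precondition, e.g. on split_text_to_cells('\n', 0): A returns [[]], B returns [[]]
import Mathlib
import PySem

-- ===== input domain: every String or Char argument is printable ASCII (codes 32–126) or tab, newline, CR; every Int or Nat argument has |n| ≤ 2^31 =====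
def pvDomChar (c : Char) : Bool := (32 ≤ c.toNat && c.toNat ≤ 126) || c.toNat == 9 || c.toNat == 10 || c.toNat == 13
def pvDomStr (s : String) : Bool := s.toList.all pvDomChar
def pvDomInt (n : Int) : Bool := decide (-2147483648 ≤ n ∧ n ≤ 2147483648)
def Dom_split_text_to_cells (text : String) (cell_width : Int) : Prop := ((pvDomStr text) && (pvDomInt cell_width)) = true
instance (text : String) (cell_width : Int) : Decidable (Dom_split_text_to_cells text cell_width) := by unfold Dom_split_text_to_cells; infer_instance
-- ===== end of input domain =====

-- B replaces A's quadratic repeated-slicing while loop by a single left-to-right pass over the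
-- line's characters with a chunk buffer (objective: alternative single-pass algorithm).


-- ===== PORT A =====
-- A's while loop: cell = line[:cell_width]; line = line[cell_width:]; a.append(cell.strip()).
-- The fuel (line.length + 1) only makes the recursion total: under Pre_ (1 ≤ cell_width) each
-- step drops at least one character, so the fuel is never exhausted.
def pvA_loop (fuel : Nat) (line : List Char) (w : Int) : List String :=
  match fuel with
  | 0 => []
  | fuel + 1 =>
    if line = [] then []
    else
      let cell := PySem.List.slice line none (some w)
      let rest := PySem.List.slice line (some w) none
      String.ofList (PySem.Chars.strip cell) :: pvA_loop fuel rest w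

def split_text_to_cells (text : String) (cell_width : Int) : List (List String) :=
  let t := PySem.Chars.replace text.toList ['\r', '\n'] ['\n']
  (PySem.Chars.splitOn (PySem.Chars.stripChars t ['\n']) ['\n']).map
    (fun line => pvA_loop (line.length + 1) line cell_width)

-- ===== PORT B =====
-- B's inner loop: for ch in line: buf += ch; if len(buf) == cell_width: flush buf.strip().
def pvB_step (w : Int) (acc : List String × List Char) (ch : Char) : List String × List Char :=
  let buf := acc.2 ++ [ch]
  if (buf.length : Int) = w then (acc.1 ++ [String.ofList (PySem.Chars.strip buf)], [])
  else (acc.1, buf)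

def pvB_line (line : List Char) (w : Int) : List String :=
  let r := line.foldl (pvB_step w) ([], [])
  if r.2 = [] then r.1 else r.1 ++ [String.ofList (PySem.Chars.strip r.2)]

def split_text_to_cells_alt (text : String) (cell_width : Int) : List (List String) :=
  let t := PySem.Chars.replace text.toList ['\r', '\n'] ['\n']
  (PySem.Chars.splitOn (PySem.Chars.stripChars t ['\n']) ['\n']).map
    (fun line => pvB_line line cell_width)

-- ===== PRECONDITION & SPEC =====
-- Pre_ excludes cell_width ≤ 0: there A's slices never shorten the line, so A loops forever on
-- any text with a nonempty line and returns only on texts that strip('\n') to empty (where B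
-- returns the same value).
def Pre_split_text_to_cells (text : String) (cell_width : Int) : Prop := 1 ≤ cell_width
instance (text : String) (cell_width : Int) : Decidable (Pre_split_text_to_cells text cell_width) := by unfold Pre_split_text_to_cells; infer_instance
def pvWitness_split_text_to_cells : String × Int := ("ab cd e\nxy", 4)

def Spec_split_text_to_cells (text : String) (cell_width : Int) (out : List (List String)) : Prop := out = split_text_to_cells_alt text cell_width
instance (text : String) (cell_width : Int) (out : List (List String)) : Decidable (Spec_split_text_to_cells text cell_width out) := by unfold Spec_split_text_to_cells; infer_instance

-- ===== CLAIM (what is proved, stated in full; the proofs are below) =====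
def Claim_equal_split_text_to_cells : Prop := ∀ (text : String) (cell_width : Int), Dom_split_text_to_cells text cell_width → Pre_split_text_to_cells text cell_width → Spec_split_text_to_cells text cell_width (split_text_to_cells text cell_width)

-- ===== LEMMAS AND PROOFS =====

-- pvA_loop ignores its fuel as long as it exceeds the line length (w ≥ 1 makes each
-- step shorten the line).
lemma pvA_loop_fuel (w : Int) (hw : 1 ≤ w) :
    ∀ (f1 f2 : Nat) (line : List Char), line.length < f1 → line.length < f2 →
      pvA_loop f1 line w = pvA_loop f2 line w := by
  intro f1
  induction f1 with
  | zero => intro f2 line h1 _; omega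
  | succ f1 ih =>
    intro f2 line h1 h2
    match f2, h2 with
    | f2 + 1, h2 =>
      by_cases hl : line = []
      · simp [pvA_loop, hl]
      · simp only [pvA_loop, if_neg hl]
        have hw0 : 0 ≤ w := by omega
        rw [PySem.List.slice_from line hw0]
        have hrest : (List.drop w.toNat line).length = line.length - w.toNat := by simp
        have hwt : 1 ≤ w.toNat := by omega
        have hne : 0 < line.length := List.length_pos_iff.mpr hl
        rw [ih f2 (List.drop w.toNat line) (by omega) (by omega)]

lemma pvA_loop_nil (w : Int) (f : Nat) : pvA_loop f [] w = [] := by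
  cases f with
  | zero => rfl
  | succ n => simp [pvA_loop]

-- a final strict partial chunk becomes exactly one cell of A's loop.
lemma pvA_loop_single (w : Int) (hw0 : 0 ≤ w) (buf : List Char) (hbuf : buf ≠ [])
    (hle : buf.length ≤ w.toNat) :
    pvA_loop (buf.length + 1) buf w = [String.ofList (PySem.Chars.strip buf)] := by
  simp only [pvA_loop, if_neg hbuf]
  rw [PySem.List.slice_to buf hw0, PySem.List.slice_from buf hw0,
    List.take_of_length_le (by omega), List.drop_eq_nil_of_le (by omega), pvA_loop_nil]

-- the key invariant: running B's char fold from state (cells, buf) and finishing equals cells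
-- followed by A's chunking of buf ++ line, as long as buf is a strict partial chunk.
lemma pvB_main (w : Int) (hw : 1 ≤ w) :
    ∀ (line buf : List Char) (cells : List String), buf.length < w.toNat →
      (let r := line.foldl (pvB_step w) (cells, buf);
       if r.2 = [] then r.1 else r.1 ++ [String.ofList (PySem.Chars.strip r.2)]) =
      cells ++ pvA_loop (buf.length + line.length + 1) (buf ++ line) w := by
  intro line
  induction line with
  | nil =>
    intro buf cells hb
    by_cases hbuf : buf = []
    · simp [pvA_loop, hbuf]
    · simp only [List.foldl_nil, List.append_nil, List.length_nil, Nat.add_zero, if_neg hbuf]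
      rw [pvA_loop_single w (by omega) buf hbuf (by omega)]
  | cons ch rest ih =>
    intro buf cells hb
    simp only [List.foldl_cons]
    have hcons : buf ++ ch :: rest = (buf ++ [ch]) ++ rest := by simp
    by_cases hfull : ((buf ++ [ch]).length : Int) = w
    · have hfull' : ((buf.length : Int) + 1) = w := by simpa using hfull
      have hwt : w.toNat = buf.length + 1 := by omega
      have hstep : pvB_step w (cells, buf) ch
          = (cells ++ [String.ofList (PySem.Chars.strip (buf ++ [ch]))], []) := by
        simp [pvB_step, hfull']
      rw [hstep]
      have h2 := ih [] (cells ++ [String.ofList (PySem.Chars.strip (buf ++ [ch]))])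
        (by simp only [List.length_nil]; omega)
      simp only [List.length_nil, List.nil_append, Nat.zero_add] at h2
      rw [h2]
      have hne : buf ++ ch :: rest ≠ [] := by simp
      have hA : pvA_loop (buf.length + (ch :: rest).length + 1) (buf ++ ch :: rest) w
          = String.ofList (PySem.Chars.strip (buf ++ [ch]))
            :: pvA_loop (buf.length + (ch :: rest).length) rest w := by
        simp only [pvA_loop, if_neg hne]
        rw [PySem.List.slice_to _ (by omega : (0:Int) ≤ w),
          PySem.List.slice_from _ (by omega : (0:Int) ≤ w), hcons,
          List.take_append_of_le_length (by simp [hwt]),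
          List.take_of_length_le (by simp [hwt]),
          List.drop_append_of_le_length (by simp [hwt]),
          List.drop_eq_nil_of_le (by simp [hwt]), List.nil_append]
      rw [hA, pvA_loop_fuel w hw (rest.length + 1) (buf.length + (ch :: rest).length) rest
        (by omega) (by simp only [List.length_cons]; omega)]
      simp
    · have hfull' : ¬ (((buf.length : Int) + 1) = w) := by simpa using hfull
      have hstep : pvB_step w (cells, buf) ch = (cells, buf ++ [ch]) := by
        simp [pvB_step, hfull']
      rw [hstep]
      have hlt : (buf ++ [ch]).length < w.toNat := by
        simp only [List.length_append, List.length_cons, List.length_nil]; omega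
      rw [ih (buf ++ [ch]) cells hlt, ← hcons]
      have hfeq : (buf ++ [ch]).length + rest.length + 1 = buf.length + (ch :: rest).length + 1 := by
        simp only [List.length_append, List.length_cons, List.length_nil]; omega
      rw [hfeq]

-- per line, A's while loop and B's fold agree.
lemma line_eq (w : Int) (hw : 1 ≤ w) (line : List Char) :
    pvA_loop (line.length + 1) line w = pvB_line line w := by
  have h := pvB_main w hw line [] [] (by simp only [List.length_nil]; omega)
  simp only [List.length_nil, List.nil_append, Nat.zero_add] at h
  unfold pvB_line
  rw [h]

-- ===== VERDICT (by name: the statement is the Claim_ definition above) =====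
theorem split_text_to_cells_spec : Claim_equal_split_text_to_cells := by
  intro text cell_width _ hpre
  unfold Spec_split_text_to_cells split_text_to_cells split_text_to_cells_alt
  simp only []
  apply List.map_congr_left
  intro line _
  exact line_eq cell_width hpre line
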